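-- pv_equiv track=rewrite | github.com/stupidchen/leetcode | src/leetcode/P5892.py | stoneGameIX
-- ===== SOURCE A (Python) =====
-- from collections import Counter
-- from functools import cache
-- from typing import List
--
-- def stoneGameIX(stones: List[int]) -> bool:
--     stones = [stone % 3 for stone in stones]
--     c = Counter(stones)
--
--     @cache
--     def f(c0, c1, c2, a):
--         if c0 + c1 + c2 == 0:
--             return not a
--         cs = s - c1 - (c2 << 1)
--         r = False
--         if c0 > 0:
--             if cs % 3 != 0:
--                 r = r or not f(c0 - 1, c1, c2, not a)
--                 if r:
--                     return True
--         if c1 > 0: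
--             if (cs + 1) % 3 != 0:
--                 r = r or not f(c0, c1 - 1, c2, not a)
--                 if r:
--                     return True
--         if c2 > 0:
--             if (cs + 2) % 3 != 0:
--                 r = r or not f(c0, c1, c2 - 1, not a)
--                 if r:
--                     return True
--         return r
--
--     c = [c[0] % 100, c[1] % 100, c[2] % 100]
--     s = c[1] + (c[2] << 1)
--     return f(c[0], c[1], c[2], True)
-- ===== SOURCE B (Python) =====
-- from typing import List
--
-- def stoneGameIX(stones: List[int]) -> bool:
--     # closed-form optimal-play rule on the residue counts mod 3
--     r = [s % 3 for s in stones]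
--     c0, c1, c2 = r.count(0), r.count(1), r.count(2)
--     if c0 % 2 == 0:
--         return c1 > 0 and c2 > 0
--     return abs(c1 - c2) > 2
-- ===== Notes on version B (the rewrite author's own statement) =====
-- stated objective: simpler
-- what changed: B replaces A's memoized recursive game search over capped residue counts with a single counting pass and the closed-form optimal-play rule (parity of the count of multiples of 3, and presence/difference of the other two residue counts).
-- intended difference: On inputs where capping the residue counts mod 100 flips the outcome (an even count of multiples of 3 with a positive residue-1 or residue-2 count that is a multiple of 100, or an odd count of multiples of 3 where the capped counts' difference crosses the threshold 2) A returns the wrong winner and B returns the true optimal-play winner; the mod-100 cap in A is a cache-bounding hack, not part of the game. — e.g. on stoneGameIX([1, 1, 1, 1, 1, 1, 1, 1, 1, 1, 1, 1, 1, 1, 1, 1, 1, 1, 1, 1, 1, 1, 1, 1, 1, 1, 1, 1, 1, 1, 1, 1, 1, 1, 1, 1, 1, 1, 1, 1…): A returns false, B returns true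
import Mathlib
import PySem

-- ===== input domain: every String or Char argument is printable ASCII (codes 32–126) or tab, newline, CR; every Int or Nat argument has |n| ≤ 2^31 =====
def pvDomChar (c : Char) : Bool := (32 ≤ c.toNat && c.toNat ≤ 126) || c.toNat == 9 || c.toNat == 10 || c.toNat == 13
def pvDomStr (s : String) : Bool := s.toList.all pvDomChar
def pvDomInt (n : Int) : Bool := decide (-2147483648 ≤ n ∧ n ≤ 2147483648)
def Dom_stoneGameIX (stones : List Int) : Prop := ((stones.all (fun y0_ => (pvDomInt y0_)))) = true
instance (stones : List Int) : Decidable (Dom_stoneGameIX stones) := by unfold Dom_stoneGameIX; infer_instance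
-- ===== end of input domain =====

-- B replaces A's memoized game search with the closed-form winning rule on the residue counts;
-- A caps each count mod 100 (a cache-bounding hack) and so returns the wrong winner when that
-- cap changes the outcome — those inputs are stated as the intended difference D_ below.

-- ===== PORT A =====
-- A's inner recursion f(c0, c1, c2, a) (the @cache memoization is dropped: it only affects speed).
-- Python recurses until c0 + c1 + c2 == 0; ported with an explicit fuel = c0 + c1 + c2 supplied at the call site.
def fAgo (s : Int) : Nat → Int → Int → Int → Bool → Bool
  | 0, _, _, _, a => !a
  | fuel+1, c0, c1, c2, a =>
    if c0 + c1 + c2 = 0 then !a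
    else
      let cs : Int := s - c1 - 2*c2          -- cs = s - c1 - (c2 << 1)
      -- Python: r = r or not f(...); if r: return True  — an early-return chain, each move guarded by `if c? > 0`
      (decide (0 < c0) && decide (PySem.Int.mod cs 3 ≠ 0) && !(fAgo s fuel (c0-1) c1 c2 (!a)))
      || (decide (0 < c1) && decide (PySem.Int.mod (cs+1) 3 ≠ 0) && !(fAgo s fuel c0 (c1-1) c2 (!a)))
      || (decide (0 < c2) && decide (PySem.Int.mod (cs+2) 3 ≠ 0) && !(fAgo s fuel c0 c1 (c2-1) (!a)))

def stoneGameIX (stones : List Int) : Bool :=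
  let stones' := stones.map (fun stone => PySem.Int.mod stone 3)
  let c := PySem.Dict.counter stones'
  let c0 := PySem.Int.mod (c.getD 0 0) 100
  let c1 := PySem.Int.mod (c.getD 1 0) 100
  let c2 := PySem.Int.mod (c.getD 2 0) 100
  let s := c1 + 2*c2                          -- s = c[1] + (c[2] << 1)
  fAgo s (c0 + c1 + c2).toNat c0 c1 c2 true

-- ===== PORT B =====
def stoneGameIX_alt (stones : List Int) : Bool :=
  let r := stones.map (fun s => PySem.Int.mod s 3)
  let c0 : Int := r.count 0
  let c1 : Int := r.count 1
  let c2 : Int := r.count 2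
  if PySem.Int.mod c0 2 = 0 then decide (0 < c1) && decide (0 < c2)
  else decide (2 < |c1 - c2|)

-- ===== PRECONDITION & SPEC =====
-- A reduces each residue count mod 100 (a bound for its memo cache) before playing the game; when
-- that reduction changes the optimal-play outcome (a positive residue-1 or residue-2 count that is
-- a multiple of 100 while the residue-0 count is even, or a capped difference of the residue-1 and
-- residue-2 counts crossing the threshold 2 while the residue-0 count is odd) A returns the wrong
-- winner and B returns the true one.
def D_stoneGameIX (stones : List Int) : Prop :=
  let n : Int → Int := fun r => (stones.countP (fun x => x % 3 == r) : Int)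
  if n 0 % 2 = 0 then 0 < n 1 ∧ 0 < n 2 ∧ (n 1 % 100 = 0 ∨ n 2 % 100 = 0)
  else ¬ (2 < |n 1 - n 2| ↔ 2 < |n 1 % 100 - n 2 % 100|)
instance (stones : List Int) : Decidable (D_stoneGameIX stones) := by unfold D_stoneGameIX; infer_instance

def Spec_stoneGameIX (stones : List Int) (out : Bool) : Prop := ¬ D_stoneGameIX stones → out = stoneGameIX_alt stones
instance (stones : List Int) (out : Bool) : Decidable (Spec_stoneGameIX stones out) := by unfold Spec_stoneGameIX; infer_instance

def pvDiffWitness_stoneGameIX : List Int := [1, 1, 1, 1, 1, 1, 1, 1, 1, 1, 1, 1, 1, 1, 1, 1, 1, 1, 1, 1, 1, 1, 1, 1, 1, 1, 1, 1, 1, 1, 1, 1, 1, 1, 1, 1, 1, 1, 1, 1, 1, 1, 1, 1, 1, 1, 1, 1, 1, 1, 1, 1, 1, 1, 1, 1, 1, 1, 1, 1, 1, 1, 1, 1, 1, 1, 1, 1, 1, 1, 1, 1, 1, 1, 1, 1, 1, 1, 1, 1, 1, 1, 1, 1, 1, 1, 1, 1, 1, 1, 1, 1, 1, 1, 1, 1,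 1, 1, 1, 1, 2]
def pvDiffWitnessOut_stoneGameIX : Bool × Bool := (false, true)

-- ===== CLAIM (what is proved, stated in full; the proofs are below) =====
def Claim_unchanged_stoneGameIX : Prop := ∀ (stones : List Int), Dom_stoneGameIX stones → Spec_stoneGameIX stones (stoneGameIX stones)
def Claim_changed_stoneGameIX : Prop := Dom_stoneGameIX (pvDiffWitness_stoneGameIX) ∧ D_stoneGameIX (pvDiffWitness_stoneGameIX) ∧ stoneGameIX (pvDiffWitness_stoneGameIX) = pvDiffWitnessOut_stoneGameIX.1 ∧ stoneGameIX_alt (pvDiffWitness_stoneGameIX) = pvDiffWitnessOut_stoneGameIX.2 ∧ pvDiffWitnessOut_stoneGameIX.1 ≠ pvDiffWitnessOut_stoneGameIX.2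
def Claim_exact_stoneGameIX : Prop := ∀ (stones : List Int), Dom_stoneGameIX stones → D_stoneGameIX stones → stoneGameIX stones ≠ stoneGameIX_alt stones

-- ===== LEMMAS AND PROOFS =====

lemma pymod (x n : Int) (hn : 0 < n) : PySem.Int.mod x n = x % n :=
  PySem.Int.mod_eq_emod_of_pos hn

-- the closed-form value of A's game recursion f(c0, c1, c2, a) where t = (s - c1 - 2*c2) % 3,
-- split by the flag a (WTb: a = True, WFb: a = False)
def WTb (c0 c1 c2 t : Int) : Bool :=
  (decide (t = 0) && ((decide (c0 % 2 = 0) && decide (1 ≤ c1) && decide (1 ≤ c2)) ||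
                      (decide (c0 % 2 = 1) && (decide (c1 + 3 ≤ c2) || decide (c2 + 3 ≤ c1))))) ||
  (decide (t = 1) && ((decide (c0 % 2 = 0) && decide (c2 + 2 ≤ c1)) ||
                      (decide (c0 % 2 = 1) && decide (c1 + 1 ≤ c2)))) ||
  (decide (t = 2) && ((decide (c0 % 2 = 0) && decide (c1 + 2 ≤ c2)) ||
                      (decide (c0 % 2 = 1) && decide (c2 + 1 ≤ c1))))

def WFb (c0 c1 c2 t : Int) : Bool :=
  (decide (t = 0) && ((decide (c0 % 2 = 1) && decide (c1 ≠ c2)) ||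
                      (decide (c0 % 2 = 0) &&
                        ((decide (1 ≤ c1) && decide (c1 ≤ 2)) ||
                         (decide (3 ≤ c1) && decide (1 ≤ c2)) ||
                         (decide (c1 = 0) && ((decide (1 ≤ c2) && decide (c2 ≤ 2)) ||
                                              (decide (c0 = 0) && decide (c2 = 0)))))))) ||
  (decide (t = 1) && ((decide (c0 % 2 = 0) && decide (c2 ≤ c1)) ||
                      (decide (c0 % 2 = 1) && decide (c1 ≤ c2 + 1)))) ||
  (decide (t = 2) && ((decide (c0 % 2 = 0) && decide (c1 ≤ c2)) ||
                      (decide (c0 % 2 = 1) && decide (c2 ≤ c1 + 1))))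

def Wb : Int → Int → Int → Int → Bool → Bool
  | c0, c1, c2, t, true => WTb c0 c1 c2 t
  | c0, c1, c2, t, false => WFb c0 c1 c2 t

lemma fAgo_succ (s : Int) (fuel : Nat) (c0 c1 c2 : Int) (a : Bool) (hz : ¬ (c0 + c1 + c2 = 0)) :
    fAgo s (fuel+1) c0 c1 c2 a =
      ((decide (0 < c0) && decide ((s - c1 - 2*c2) % 3 ≠ 0) && !(fAgo s fuel (c0-1) c1 c2 (!a)))
      || (decide (0 < c1) && decide (((s - c1 - 2*c2)+1) % 3 ≠ 0) && !(fAgo s fuel c0 (c1-1) c2 (!a)))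
      || (decide (0 < c2) && decide (((s - c1 - 2*c2)+2) % 3 ≠ 0) && !(fAgo s fuel c0 c1 (c2-1) (!a)))) := by
  simp only [fAgo, if_neg hz, pymod _ 3 (by norm_num : (0:Int) < 3)]

lemma guard_dead (p : Prop) [Decidable p] (h : ¬ p) (x y z : Bool) :
    (decide p && x && y) = (decide p && x && z) := by
  simp only [decide_eq_false h, Bool.false_and]

set_option maxHeartbeats 4000000 in
lemma fAgo_eq (fuel : Nat) : ∀ (c0 c1 c2 s : Int) (a : Bool),
    0 ≤ c0 → 0 ≤ c1 → 0 ≤ c2 → c0 + c1 + c2 ≤ fuel →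
    fAgo s fuel c0 c1 c2 a = Wb c0 c1 c2 ((s - c1 - 2*c2) % 3) a := by
  induction fuel with
  | zero =>
    intro c0 c1 c2 s a h0 h1 h2 hf
    have e0 : c0 = 0 := by omega
    have e1 : c1 = 0 := by omega
    have e2 : c2 = 0 := by omega
    subst e0; subst e1; subst e2
    cases a <;> rw [Bool.eq_iff_iff] <;>
      simp only [fAgo, Wb, WTb, WFb, Bool.not_true, Bool.not_false, Bool.false_eq_true,
        eq_self_iff_true, Bool.or_eq_true, Bool.and_eq_true, decide_eq_true_eq,
        false_iff, true_iff] <;> (norm_num; try omega)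
  | succ fuel ih =>
    intro c0 c1 c2 s a h0 h1 h2 hf
    by_cases hz : c0 + c1 + c2 = 0
    · have e0 : c0 = 0 := by omega
      have e1 : c1 = 0 := by omega
      have e2 : c2 = 0 := by omega
      subst e0; subst e1; subst e2
      cases a <;> rw [Bool.eq_iff_iff] <;>
        simp only [fAgo, Wb, WTb, WFb, Bool.not_true, Bool.not_false, Bool.false_eq_true,
          eq_self_iff_true, Bool.or_eq_true, Bool.and_eq_true, decide_eq_true_eq,
          false_iff, true_iff, show ((0:Int) + 0 + 0 = 0) from rfl, if_true] <;> (norm_num; try omega)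
    · rw [fAgo_succ s fuel c0 c1 c2 a hz]
      have e0 : (decide (0 < c0) && decide ((s - c1 - 2*c2) % 3 ≠ 0) && !(fAgo s fuel (c0-1) c1 c2 (!a)))
              = (decide (0 < c0) && decide ((s - c1 - 2*c2) % 3 ≠ 0) && !(Wb (c0-1) c1 c2 ((s - c1 - 2*c2) % 3) (!a))) := by
        by_cases hc : 0 < c0
        · rw [ih (c0-1) c1 c2 s (!a) (by omega) h1 h2 (by omega)]
        · exact guard_dead _ hc _ _ _
      have e1 : (decide (0 < c1) && decide (((s - c1 - 2*c2)+1) % 3 ≠ 0) && !(fAgo s fuel c0 (c1-1) c2 (!a)))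
              = (decide (0 < c1) && decide (((s - c1 - 2*c2)+1) % 3 ≠ 0) && !(Wb c0 (c1-1) c2 ((s - (c1-1) - 2*c2) % 3) (!a))) := by
        by_cases hc : 0 < c1
        · rw [ih c0 (c1-1) c2 s (!a) h0 (by omega) h2 (by omega)]
        · exact guard_dead _ hc _ _ _
      have e2 : (decide (0 < c2) && decide (((s - c1 - 2*c2)+2) % 3 ≠ 0) && !(fAgo s fuel c0 c1 (c2-1) (!a)))
              = (decide (0 < c2) && decide (((s - c1 - 2*c2)+2) % 3 ≠ 0) && !(Wb c0 c1 (c2-1) ((s - c1 - 2*(c2-1)) % 3) (!a))) := by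
        by_cases hc : 0 < c2
        · rw [ih c0 c1 (c2-1) s (!a) h0 h1 (by omega) (by omega)]
        · exact guard_dead _ hc _ _ _
      rw [e0, e1, e2]
      have hm : (s - c1 - 2*c2) % 3 = 0 ∨ (s - c1 - 2*c2) % 3 = 1 ∨ (s - c1 - 2*c2) % 3 = 2 := by omega
      rcases hm with h3 | h3 | h3
      · rw [h3, show ((s - c1 - 2*c2)+1) % 3 = 1 from by omega,
            show ((s - c1 - 2*c2)+2) % 3 = 2 from by omega,
            show (s - (c1-1) - 2*c2) % 3 = 1 from by omega,
            show (s - c1 - 2*(c2-1)) % 3 = 2 from by omega]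
        cases a <;> rw [Bool.eq_iff_iff] <;>
          simp only [Bool.not_true, Bool.not_false, Wb, WTb, WFb,
            Bool.or_eq_true, Bool.and_eq_true, Bool.not_eq_true', Bool.or_eq_false_iff,
            Bool.and_eq_false_iff, decide_eq_true_eq, decide_eq_false_iff_not] <;> (norm_num; try omega)
      · rw [h3, show ((s - c1 - 2*c2)+1) % 3 = 2 from by omega,
            show ((s - c1 - 2*c2)+2) % 3 = 0 from by omega,
            show (s - (c1-1) - 2*c2) % 3 = 2 from by omega,
            show (s - c1 - 2*(c2-1)) % 3 = 0 from by omega]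
        cases a <;> rw [Bool.eq_iff_iff] <;>
          simp only [Bool.not_true, Bool.not_false, Wb, WTb, WFb,
            Bool.or_eq_true, Bool.and_eq_true, Bool.not_eq_true', Bool.or_eq_false_iff,
            Bool.and_eq_false_iff, decide_eq_true_eq, decide_eq_false_iff_not] <;> (norm_num; try omega)
      · rw [h3, show ((s - c1 - 2*c2)+1) % 3 = 0 from by omega,
            show ((s - c1 - 2*c2)+2) % 3 = 1 from by omega,
            show (s - (c1-1) - 2*c2) % 3 = 0 from by omega,
            show (s - c1 - 2*(c2-1)) % 3 = 1 from by omega]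
        cases a <;> rw [Bool.eq_iff_iff] <;>
          simp only [Bool.not_true, Bool.not_false, Wb, WTb, WFb,
            Bool.or_eq_true, Bool.and_eq_true, Bool.not_eq_true', Bool.or_eq_false_iff,
            Bool.and_eq_false_iff, decide_eq_true_eq, decide_eq_false_iff_not] <;> (norm_num; try omega)

-- A's value, as the closed form on the mod-100-capped residue counts
lemma A_val (stones : List Int) :
    stoneGameIX stones =
      WTb (((stones.map (fun x => PySem.Int.mod x 3)).count 0 : Int) % 100)
          (((stones.map (fun x => PySem.Int.mod x 3)).count 1 : Int) % 100)
          (((stones.map (fun x => PySem.Int.mod x 3)).count 2 : Int) % 100) 0 := by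
  unfold stoneGameIX
  simp only [PySem.Dict.getD_counter]
  set n0 : Int := ((stones.map (fun x => PySem.Int.mod x 3)).count 0 : Int) with hn0
  set n1 : Int := ((stones.map (fun x => PySem.Int.mod x 3)).count 1 : Int) with hn1
  set n2 : Int := ((stones.map (fun x => PySem.Int.mod x 3)).count 2 : Int) with hn2
  rw [pymod n0 100 (by norm_num), pymod n1 100 (by norm_num), pymod n2 100 (by norm_num)]
  have b0 : 0 ≤ n0 % 100 := Int.emod_nonneg _ (by norm_num)
  have b1 : 0 ≤ n1 % 100 := Int.emod_nonneg _ (by norm_num)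
  have b2 : 0 ≤ n2 % 100 := Int.emod_nonneg _ (by norm_num)
  rw [fAgo_eq ((n0 % 100) + (n1 % 100) + (n2 % 100)).toNat (n0 % 100) (n1 % 100) (n2 % 100)
        ((n1 % 100) + 2*(n2 % 100)) true b0 b1 b2 (by omega)]
  rw [show ((n1 % 100) + 2*(n2 % 100) - (n1 % 100) - 2*(n2 % 100)) = 0 by ring]
  rfl

-- B's value, as the closed form on the true residue counts
lemma B_val (stones : List Int) :
    stoneGameIX_alt stones =
      (if PySem.Int.mod ((stones.map (fun x => PySem.Int.mod x 3)).count 0 : Int) 2 = 0 then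
        decide (0 < ((stones.map (fun x => PySem.Int.mod x 3)).count 1 : Int)) &&
        decide (0 < ((stones.map (fun x => PySem.Int.mod x 3)).count 2 : Int))
      else decide (2 < |((stones.map (fun x => PySem.Int.mod x 3)).count 1 : Int) -
                       ((stones.map (fun x => PySem.Int.mod x 3)).count 2 : Int)|)) := rfl

-- D_'s countP over the stones is the count over the residue list
lemma cntP (stones : List Int) (r : Int) :
    ((stones.countP (fun x => x % 3 == r) : Nat) : Int)
      = ((stones.map (fun x => PySem.Int.mod x 3)).count r : Int) := by
  have : ∀ x : Int, PySem.Int.mod x 3 = x % 3 := fun x => pymod x 3 (by norm_num)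
  simp only [List.count, List.countP_map, Function.comp_def, this]

-- the two closed forms agree exactly off the flip region
lemma key (n0 n1 n2 : Int) (p1 : 0 ≤ n1) (p2 : 0 ≤ n2) :
    (WTb (n0 % 100) (n1 % 100) (n2 % 100) 0
      = if n0 % 2 = 0 then decide (0 < n1) && decide (0 < n2) else decide (2 < |n1 - n2|))
    ↔ ¬ (if n0 % 2 = 0 then 0 < n1 ∧ 0 < n2 ∧ (n1 % 100 = 0 ∨ n2 % 100 = 0)
         else ¬ ((2 < |n1 - n2|) ↔ (2 < |n1 % 100 - n2 % 100|))) := by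
  rw [Bool.eq_iff_iff]
  by_cases he : n0 % 2 = 0
  · simp only [if_pos he]
    simp only [WTb, Bool.or_eq_true, Bool.and_eq_true, decide_eq_true_eq]
    norm_num
    omega
  · simp only [if_neg he]
    simp only [WTb, Bool.or_eq_true, Bool.and_eq_true, decide_eq_true_eq, lt_abs]
    norm_num
    omega

-- ===== VERDICT (by name: the statement is the Claim_ definition above) =====
theorem stoneGameIX_spec : Claim_unchanged_stoneGameIX := by
  intro stones _ hD
  rw [A_val, B_val, pymod _ 2 (by norm_num)]
  unfold D_stoneGameIX at hD
  simp only [cntP] at hD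
  exact (key _ _ _ (Int.natCast_nonneg _) (Int.natCast_nonneg _)).mpr hD

set_option maxRecDepth 100000 in
set_option maxHeartbeats 4000000 in
theorem stoneGameIX_changed : Claim_changed_stoneGameIX := by
  unfold Claim_changed_stoneGameIX; decide

theorem stoneGameIX_tight : Claim_exact_stoneGameIX := by
  intro stones _ hD h
  rw [A_val, B_val, pymod _ 2 (by norm_num)] at h
  unfold D_stoneGameIX at hD
  simp only [cntP] at hD
  exact ((key _ _ _ (Int.natCast_nonneg _) (Int.natCast_nonneg _)).mp h) hD
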